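-- pv_equiv track=rewrite | github.com/jjpp/aoc | 2016/07/tls.py | check
-- ===== SOURCE A (Python) =====
-- def abba(s):
--     for i in range(3, len(s)):
--         if s[i - 3] == s[i] and s[i-2] == s[i-1] and s[i-1] != s[i]:
--             return True
--     return False
--
-- def check(l):
--     found = 0
--     while len(l) > 0:
--         _l = l.split('[', 1)
--         if abba(_l[0]):
--             found = 1
--         l = _l[1] if len(_l) > 1 else ""
--         _l = l.split(']', 1)
--         if abba(_l[0]):
--             return 0
--         l = _l[1] if len(_l) > 1 else ""
--
--     return found
-- ===== SOURCE B (Python) =====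
-- def check(l):
--     # One linear pass: segment buffer + expected-bracket flag, then judge the buckets.
--     supers, hypers = [], []
--     buf = []
--     sup = True
--     for c in l:
--         if c == ('[' if sup else ']'):
--             (supers if sup else hypers).append(''.join(buf))
--             buf = []
--             sup = not sup
--         else:
--             buf.append(c)
--     (supers if sup else hypers).append(''.join(buf))
--
--     def abba(s):
--         return any(a == d and b == c and a != b
--                    for a, b, c, d in zip(s, s[1:], s[2:], s[3:]))
--
--     return 1 if any(map(abba, supers)) and not any(map(abba, hypers)) else 0
-- ===== Notes on version B (the rewrite author's own statement) =====
-- stated objective: alternative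
-- what changed: A repeatedly chops the remaining string with maxsplit-1 splits in a while loop and tests each piece with an index-based window loop; B makes a single buffered character scan that toggles between supernet and hypernet buckets, collects both segment lists, and tests four-character windows via zipped shifted tails.
import Mathlib
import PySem

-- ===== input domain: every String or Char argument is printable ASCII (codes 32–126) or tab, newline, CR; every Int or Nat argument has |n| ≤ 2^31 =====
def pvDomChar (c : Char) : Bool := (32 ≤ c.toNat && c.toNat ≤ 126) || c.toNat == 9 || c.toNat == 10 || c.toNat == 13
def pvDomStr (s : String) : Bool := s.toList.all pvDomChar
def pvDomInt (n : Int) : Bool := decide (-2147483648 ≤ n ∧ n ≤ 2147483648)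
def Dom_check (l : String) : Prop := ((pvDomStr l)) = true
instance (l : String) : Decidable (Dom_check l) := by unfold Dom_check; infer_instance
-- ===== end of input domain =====

-- B replaces A's repeated split('[',1)/split(']',1) string surgery by one char scan that
-- buckets supernet/hypernet segments and then judges the buckets (objective: alternative).

-- ===== PORT A =====

-- the loop body of abba: the condition tested at index i
def winAt (s : List Char) (i : Int) : Bool :=
  (PySem.List.pyGet? s (i - 3) == PySem.List.pyGet? s i) &&
  (PySem.List.pyGet? s (i - 2) == PySem.List.pyGet? s (i - 1)) &&
  !(PySem.List.pyGet? s (i - 1) == PySem.List.pyGet? s i)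

-- abba(s): for i in range(3, len(s)): early-return True ≡ any
def abbaA (s : List Char) : Bool :=
  (PySem.List.pyRange 3 (s.length : Int) 1).any (winAt s)

-- exact hand port of str.split(sep, 1) for a one-char sep, on code points:
-- result [p] (snd = none) when sep is absent, [p, r] (snd = some r) when present
def splitOnce (sep : Char) : List Char → List Char × Option (List Char)
  | [] => ([], none)
  | c :: rest =>
    if c = sep then ([], some rest)
    else
      let r := splitOnce sep rest
      (c :: r.1, r.2)

theorem splitOnce_some_length (sep : Char) (l p r : List Char)
    (h : splitOnce sep l = (p, some r)) : r.length < l.length := by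
  induction l generalizing p r with
  | nil => simp [splitOnce] at h
  | cons c rest ih =>
    by_cases hc : c = sep
    · simp [splitOnce, hc] at h
      simp [← h.2]
    · rcases hr : splitOnce sep rest with ⟨p', r?⟩
      rcases r? with _ | r'
      · simp [splitOnce, hc, hr] at h
      · have hlt := ih p' r' hr
        simp [splitOnce, hc, hr] at h
        obtain ⟨-, h2⟩ := h
        subst h2
        simp
        omega

theorem splitOnce_rest_le (sep : Char) (l : List Char) :
    ((splitOnce sep l).2.getD []).length ≤ l.length := by
  rcases h : splitOnce sep l with ⟨p, _ | r⟩
  · simp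
  · have := splitOnce_some_length sep l p r h
    simp; omega

-- the while loop of check, recursing on the remaining string
def checkLoop : List Char → Int → Int
  | [], found => found
  | c :: rest, found =>
    let t := splitOnce '[' (c :: rest)
    let found1 := if abbaA t.1 then 1 else found
    let l1 := t.2.getD []
    let u := splitOnce ']' l1
    if abbaA u.1 then 0
    else checkLoop (u.2.getD []) found1
termination_by l _ => l.length
decreasing_by
  have h1 : ((splitOnce '[' (c :: rest)).2.getD []).length ≤ rest.length := by
    rcases h : splitOnce '[' (c :: rest) with ⟨p, _ | r⟩
    · simp
    · have := splitOnce_some_length '[' (c :: rest) p r h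
      simp at this ⊢; omega
  have h2 := splitOnce_rest_le ']' ((splitOnce '[' (c :: rest)).2.getD [])
  simp only [List.length_cons]
  omega

def check (l : String) : Int := checkLoop l.toList 0

-- ===== PORT B =====

-- abba via zip of shifted tails (zip(s, s[1:], s[2:], s[3:]) as nested zips)
def abbaAlt (s : List Char) : Bool :=
  ((s.zip (s.drop 1)).zip ((s.drop 2).zip (s.drop 3))).any fun w =>
    (w.1.1 == w.2.2) && (w.1.2 == w.2.1) && (w.1.1 != w.1.2)

-- one step of the scan: state = (expecting-'['-flag, buffer, supernets, hypernets)
def stepB (st : Bool × List Char × List (List Char) × List (List Char)) (c : Char) :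
    Bool × List Char × List (List Char) × List (List Char) :=
  if c == (if st.1 then '[' else ']') then
    if st.1 then (false, [], st.2.2.1 ++ [st.2.1], st.2.2.2)
    else (true, [], st.2.2.1, st.2.2.2 ++ [st.2.1])
  else (st.1, st.2.1 ++ [c], st.2.2.1, st.2.2.2)

def check_alt (l : String) : Int :=
  let st := l.toList.foldl stepB (true, [], [], [])
  let S := if st.1 then st.2.2.1 ++ [st.2.1] else st.2.2.1
  let H := if st.1 then st.2.2.2 else st.2.2.2 ++ [st.2.1]
  if S.any abbaAlt && !(H.any abbaAlt) then 1 else 0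

-- ===== PRECONDITION & SPEC =====
def Spec_check (l : String) (out : Int) : Prop := out = check_alt l
instance (l : String) (out : Int) : Decidable (Spec_check l out) := by unfold Spec_check; infer_instance

-- ===== CLAIM (what is proved, stated in full; the proofs are below) =====
def Claim_equal_check : Prop := ∀ (l : String), Dom_check l → Spec_check l (check l)

-- ===== LEMMAS AND PROOFS =====

theorem char_beq_comm (c d : Char) : (c == d) = (d == c) := by
  by_cases h : c = d
  · simp [h]
  · have h2 : ¬ d = c := fun hh => h hh.symm
    simp [h, h2]

-- common window predicate, recursive form
def win : List Char → Bool
  | a :: b :: c :: d :: rest => ((a == d) && (b == c) && !(a == b)) || win (b :: c :: d :: rest)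
  | _ => false

theorem abbaAlt_eq_win (s : List Char) : abbaAlt s = win s := by
  induction s using win.induct with
  | case1 a b c d rest ih =>
    simp [abbaAlt, win, bne] at ih ⊢
    rw [ih]
  | case2 s h =>
    rcases s with _ | ⟨a, _ | ⟨b, _ | ⟨c, _ | ⟨d, t⟩⟩⟩⟩
    · simp [abbaAlt, win]
    · simp [abbaAlt, win]
    · simp [abbaAlt, win]
    · simp [abbaAlt, win]
    · exact absurd rfl (h a b c d t)

theorem pyGet?_cons_shift (x : Char) (t : List Char) (j : Int) (hj : 1 ≤ j) :
    PySem.List.pyGet? (x :: t) j = PySem.List.pyGet? t (j - 1) := by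
  simp only [PySem.List.pyGet?, PySem.List.pyIdx?]
  rw [if_pos (by omega : (0:Int) ≤ j), if_pos (by omega : (0:Int) ≤ j - 1)]
  have hl : ((x :: t).length : Int) = (t.length : Int) + 1 := by simp
  by_cases hle : j - 1 < (t.length : Int)
  · rw [if_pos (by rw [hl]; omega), if_pos hle]
    have htn : j.toNat = (j - 1).toNat + 1 := by omega
    rw [htn]
    simp
  · rw [if_neg (by rw [hl]; omega), if_neg hle]
    rfl

theorem winAt_shift (x : Char) (t : List Char) (i : Int) (hi : 4 ≤ i) :
    winAt (x :: t) i = winAt t (i - 1) := by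
  unfold winAt
  rw [pyGet?_cons_shift x t (i - 3) (by omega), pyGet?_cons_shift x t (i - 2) (by omega),
      pyGet?_cons_shift x t (i - 1) (by omega), pyGet?_cons_shift x t i (by omega),
      show i - 3 - 1 = i - 1 - 3 by ring, show i - 2 - 1 = i - 1 - 2 by ring]

theorem winAt_head (a b c d : Char) (rest : List Char) :
    winAt (a :: b :: c :: d :: rest) 3 = ((a == d) && (b == c) && !(a == b)) := by
  unfold winAt
  rw [show (3:Int) - 3 = ((0:Nat):Int) by norm_num,
      show (3:Int) - 2 = ((1:Nat):Int) by norm_num,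
      show (3:Int) - 1 = ((2:Nat):Int) by norm_num,
      show (3:Int) = ((3:Nat):Int) by norm_num]
  simp only [PySem.List.pyGet?_natCast]
  simp only [List.getElem?_cons_zero, List.getElem?_cons_succ]
  simp only [Option.some_beq_some]
  by_cases had : a = d
  · by_cases hbc : b = c
    · subst had; subst hbc; simp [char_beq_comm]
    · have h : (b == c) = false := by simp [hbc]
      rw [h]; simp
  · have h : (a == d) = false := by simp [had]
    rw [h]; simp

theorem abbaA_eq_win (s : List Char) : abbaA s = win s := by
  induction s using win.induct with
  | case2 s h =>
    have hlen : s.length ≤ 3 := by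
      rcases s with _ | ⟨a, _ | ⟨b, _ | ⟨c, _ | ⟨d, t⟩⟩⟩⟩
      · simp
      · simp
      · simp
      · simp
      · exact absurd rfl (h a b c d t)
    have hwin : win s = false := by
      rcases s with _ | ⟨a, _ | ⟨b, _ | ⟨c, _ | ⟨d, t⟩⟩⟩⟩
      · rfl
      · rfl
      · rfl
      · rfl
      · exact absurd rfl (h a b c d t)
    rw [hwin, abbaA, PySem.List.pyRange_one_eq_nil (by exact_mod_cast hlen)]
    simp
  | case1 a b c d rest ih =>
    rw [abbaA, win, ← ih, abbaA]
    have hlen : (((a :: b :: c :: d :: rest).length : Nat) : Int) = (rest.length : Int) + 4 := by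
      simp; omega
    have hlen' : (((b :: c :: d :: rest).length : Nat) : Int) = (rest.length : Int) + 3 := by
      simp; omega
    rw [hlen, hlen', PySem.List.pyRange_one, PySem.List.pyRange_one,
        show (((rest.length : Int) + 4 - 3)).toNat = rest.length + 1 by omega,
        show (((rest.length : Int) + 3 - 3)).toNat = rest.length by omega,
        List.any_map, List.any_map, List.range_succ_eq_map, List.any_cons, List.any_map]
    congr 1
    · show winAt (a :: b :: c :: d :: rest) (3 + ((0:Nat):Int)) = _
      rw [show (3:Int) + ((0:Nat):Int) = 3 by norm_num, winAt_head]
    · congr 1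
      funext k
      show winAt (a :: b :: c :: d :: rest) (3 + ((k+1 : Nat) : Int))
        = winAt (b :: c :: d :: rest) (3 + (k : Int))
      rw [show (3:Int) + ((k+1 : Nat) : Int) = 3 + (k:Int) + 1 by push_cast; ring,
          winAt_shift _ _ _ (by omega), show (3:Int) + (k:Int) + 1 - 1 = 3 + (k:Int) by ring]

-- B's scan, as a recursive specification (proof-only helper)
def segs : List Char → Bool → List Char → List (List Char) × List (List Char)
  | [], sup, buf => if sup then ([buf], []) else ([], [buf])
  | c :: rest, sup, buf =>
    if c = (if sup then '[' else ']') then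
      let r := segs rest (!sup) []
      if sup then (buf :: r.1, r.2) else (r.1, buf :: r.2)
    else segs rest sup (buf ++ [c])

theorem foldl_stepB (l : List Char) : ∀ (sup : Bool) (buf : List Char)
    (S H : List (List Char)),
    (let st := l.foldl stepB (sup, buf, S, H)
     ((if st.1 then st.2.2.1 ++ [st.2.1] else st.2.2.1),
      (if st.1 then st.2.2.2 else st.2.2.2 ++ [st.2.1])))
    = (S ++ (segs l sup buf).1, H ++ (segs l sup buf).2) := by
  induction l with
  | nil => intro sup buf S H; cases sup <;> simp [segs]
  | cons c rest ih =>
    intro sup buf S H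
    by_cases hc : c = (if sup then '[' else ']')
    · cases sup
      · simp only [List.foldl_cons, stepB, hc, segs, beq_self_eq_true, if_true,
          Bool.not_false, ite_false, Bool.false_eq_true]
        rw [ih]
        rcases segs rest true [] with ⟨S', H'⟩
        simp
      · simp only [List.foldl_cons, stepB, hc, segs, beq_self_eq_true, if_true,
          Bool.not_true]
        rw [ih]
        rcases segs rest false [] with ⟨S', H'⟩
        simp
    · have hc' : (c == (if sup then '[' else ']')) = false := by simp [hc]
      simp only [List.foldl_cons, stepB, hc', segs, if_neg hc, Bool.false_eq_true, ite_false]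
      exact ih sup (buf ++ [c]) S H

theorem segs_splitOnce (l : List Char) : ∀ (sup : Bool) (buf : List Char),
    segs l sup buf =
      (match splitOnce (if sup then '[' else ']') l with
       | (p, none) => if sup then ([buf ++ p], ([] : List (List Char))) else ([], [buf ++ p])
       | (p, some r) =>
         let t := segs r (!sup) []
         if sup then ((buf ++ p) :: t.1, t.2) else (t.1, (buf ++ p) :: t.2)) := by
  induction l with
  | nil => intro sup buf; cases sup <;> simp [segs, splitOnce]
  | cons c rest ih =>
    intro sup buf
    by_cases hc : c = (if sup then '[' else ']')
    · simp only [segs, hc, splitOnce]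
      cases sup <;> simp
    · simp only [segs, if_neg hc, splitOnce, ih]
      rcases h : splitOnce (if sup then '[' else ']') rest with ⟨p, _ | r⟩ <;>
        cases sup <;> simp_all

theorem segs_true_none (l p : List Char) (h : splitOnce '[' l = (p, none)) :
    segs l true [] = ([p], []) := by
  rw [segs_splitOnce]; simp [h]

theorem segs_true_some (l p r : List Char) (h : splitOnce '[' l = (p, some r)) :
    segs l true [] = (p :: (segs r false []).1, (segs r false []).2) := by
  rw [segs_splitOnce]; simp [h]

theorem segs_false_none (l p : List Char) (h : splitOnce ']' l = (p, none)) :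
    segs l false [] = ([], [p]) := by
  rw [segs_splitOnce]; simp [h]

theorem segs_false_some (l p r : List Char) (h : splitOnce ']' l = (p, some r)) :
    segs l false [] = ((segs r true []).1, p :: (segs r true []).2) := by
  rw [segs_splitOnce]; simp [h]

-- the value A's loop computes, phrased on B's buckets (fuel = a length bound)
theorem checkLoop_eq : ∀ (n : Nat) (l : List Char) (found : Int), l.length ≤ n →
    checkLoop l found =
      (if ((segs l true []).2.any abbaA) then 0
       else if ((segs l true []).1.any abbaA) then 1 else found) := by
  intro n
  induction n with
  | zero =>
    intro l found hl
    have hnil : l = [] := by cases l <;> simp_all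
    subst hnil
    simp [checkLoop, segs, abbaA_eq_win, win]
  | succ n ih =>
    intro l found hl
    cases l with
    | nil => simp [checkLoop, segs, abbaA_eq_win, win]
    | cons c rest =>
      rw [checkLoop]
      rcases ht : splitOnce '[' (c :: rest) with ⟨p, r?⟩
      rcases r? with _ | r
      · rw [segs_true_none _ _ ht]
        have hA : abbaA ([] : List Char) = false := by rw [abbaA_eq_win]; rfl
        simp [splitOnce, hA, checkLoop]
      · rw [segs_true_some _ _ _ ht]
        have hrlen : r.length ≤ n := by
          have := splitOnce_some_length '[' (c :: rest) p r ht
          simp at this hl; omega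
        rcases hu : splitOnce ']' r with ⟨q, s?⟩
        simp only [hu, Option.getD_some]
        rcases s? with _ | s2
        · rw [segs_false_none _ _ hu]
          by_cases hq : abbaA q
          · simp [hq]
          · simp [hq, checkLoop]
        · rw [segs_false_some _ _ _ hu]
          simp only [Option.getD_some]
          have hs2len : s2.length ≤ n := by
            have := splitOnce_some_length ']' r q s2 hu
            omega
          by_cases hq : abbaA q
          · simp [hq]
          · rw [ih s2 (if abbaA p then 1 else found) hs2len]
            cases hH : (segs s2 true []).2.any abbaA <;>
              cases hS : (segs s2 true []).1.any abbaA <;>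
                by_cases hp : abbaA p <;>
                  simp [hH, hS, hp, hq]

theorem abba_funext : abbaAlt = abbaA :=
  funext fun s => (abbaAlt_eq_win s).trans (abbaA_eq_win s).symm

theorem check_spec' (l : String) : check l = check_alt l := by
  have hf := foldl_stepB l.toList true [] [] []
  simp only [List.nil_append] at hf
  have h1 := congrArg Prod.fst hf
  have h2 := congrArg Prod.snd hf
  simp only at h1 h2
  rw [check, checkLoop_eq l.toList.length l.toList 0 le_rfl]
  rw [check_alt]
  simp only [abba_funext, h1, h2]
  cases hH : (segs l.toList true []).2.any abbaA <;>
    cases hS : (segs l.toList true []).1.any abbaA <;>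
      simp_all

-- ===== VERDICT (by name: the statement is the Claim_ definition above) =====
theorem check_spec : Claim_equal_check := by
  intro l _
  unfold Spec_check
  exact check_spec' l
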